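-- pv_equiv track=rewrite | github.com/Theheerpatel/AI-based-student-introduction-analyzer | app.py | score_flow
-- ===== SOURCE A (Python) =====
-- def score_flow(text_data):
--     sentences = text_data['sentences']
--     if len(sentences) < 2:
--         return 0
--
--     found_salutation = False
--     found_basic_details = False
--     found_additional_details = False
--     found_closing = False
--
--     for i, sentence in enumerate(sentences):
--         sentence_lower = sentence.lower()
--
--         if i < 2:
--             if any(word in sentence_lower for word in ["hello", "hi", "good morning", "good afternoon", "good evening"]):
--                 found_salutation = True
--
--         if any(word in sentence_lower for word in ["myself", "my name", "i am", "years old", "class", "school", "age", "from"]):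
--             found_basic_details = True
--
--         if found_basic_details and any(word in sentence_lower for word in ["family", "hobby", "like", "enjoy", "fun fact", "favorite", "dream", "goal"]):
--             found_additional_details = True
--
--         if i >= len(sentences) - 2:
--             if any(word in sentence_lower for word in ["thank you", "thanks", "thank"]):
--                 found_closing = True
--
--     if found_salutation and found_basic_details and found_additional_details and found_closing:
--         return 5
--     else:
--         return 0
-- ===== SOURCE B (Python) =====
-- _SAL = ["hello", "hi", "good morning", "good afternoon", "good evening"]
-- _BASIC = ["myself", "my name", "i am", "years old", "class", "school", "age", "from"]
-- _ADD = ["family", "hobby", "like", "enjoy", "fun fact", "favorite", "dream", "goal"]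
-- _CLOSE = ["thank you", "thanks", "thank"]
--
--
-- def _hits(kws, s):
--     return any(w in s for w in kws)
--
--
-- def score_flow(text_data):
--     sentences = text_data['sentences']
--     if len(sentences) < 2:
--         return 0
--     low = [s.lower() for s in sentences]
--     first_basic = next((i for i, s in enumerate(low) if _hits(_BASIC, s)), None)
--     if first_basic is None:
--         return 0
--     salutation = any(_hits(_SAL, s) for s in low[:2])
--     additional = any(_hits(_ADD, s) for s in low[first_basic:])
--     closing = any(_hits(_CLOSE, s) for s in low[-2:])
--     return 5 if salutation and additional and closing else 0
-- ===== Notes on version B (the rewrite author's own statement) =====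
-- stated objective: simpler
-- what changed: Replaces the single four-flag accumulating loop by four independent checks: first index of a basic keyword, then plain any() over the first-two / suffix-from-first-basic / last-two windows.
import Mathlib
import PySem

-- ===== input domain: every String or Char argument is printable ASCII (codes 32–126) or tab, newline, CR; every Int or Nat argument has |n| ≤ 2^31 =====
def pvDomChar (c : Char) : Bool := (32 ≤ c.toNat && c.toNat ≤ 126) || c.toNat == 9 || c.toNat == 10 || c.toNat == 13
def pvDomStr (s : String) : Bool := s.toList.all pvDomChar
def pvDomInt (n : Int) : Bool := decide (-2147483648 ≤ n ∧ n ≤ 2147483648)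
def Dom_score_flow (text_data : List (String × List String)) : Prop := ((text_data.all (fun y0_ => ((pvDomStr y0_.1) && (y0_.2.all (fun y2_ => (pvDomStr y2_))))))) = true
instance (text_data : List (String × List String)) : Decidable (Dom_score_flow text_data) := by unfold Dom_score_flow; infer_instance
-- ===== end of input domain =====

-- B computes the four component booleans as independent window checks instead of A's
-- four-flag accumulating loop; objective: simpler. Return value only (no mutation).

-- keyword lists shared by both Pythons (module-level constants)
def kwSal : List String := ["hello", "hi", "good morning", "good afternoon", "good evening"]
def kwBasic : List String := ["myself", "my name", "i am", "years old", "class", "school", "age", "from"]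
def kwAdd : List String := ["family", "hobby", "like", "enjoy", "fun fact", "favorite", "dream", "goal"]
def kwClose : List String := ["thank you", "thanks", "thank"]

-- any(word in s for word in kws)
def hitsKw (kws : List String) (s : String) : Bool := kws.any (fun w => PySem.Str.isIn w s)

-- ===== PORT A =====
def score_flow (text_data : List (String × List String)) : Int :=
  match (PySem.Dict.ofList text_data).get? "sentences" with
  | none => 0   -- KeyError; excluded by Pre_
  | some sentences =>
    if sentences.length < 2 then 0
    else
      let st := (PySem.List.enumerate sentences).foldl
        (fun (fl : Bool × Bool × Bool × Bool) (p : Int × String) =>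
          let sl := PySem.Str.lower p.2
          let foundSal := fl.1 || (decide (p.1 < 2) && hitsKw kwSal sl)
          let foundBasic := fl.2.1 || hitsKw kwBasic sl
          let foundAdd := fl.2.2.1 || (foundBasic && hitsKw kwAdd sl)
          let foundClose := fl.2.2.2 || (decide ((sentences.length : Int) - 2 ≤ p.1) && hitsKw kwClose sl)
          (foundSal, foundBasic, foundAdd, foundClose))
        (false, false, false, false)
      if st.1 && st.2.1 && st.2.2.1 && st.2.2.2 then 5 else 0

-- ===== PORT B =====
def score_flow_alt (text_data : List (String × List String)) : Int :=
  match (PySem.Dict.ofList text_data).get? "sentences" with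
  | none => 0   -- KeyError; excluded by Pre_
  | some sentences =>
    if sentences.length < 2 then 0
    else
      let low := sentences.map PySem.Str.lower
      match low.findIdx? (hitsKw kwBasic) with
      | none => 0
      | some firstBasic =>
        let salutation := (low.take 2).any (hitsKw kwSal)
        let additional := (low.drop firstBasic).any (hitsKw kwAdd)
        let closing := (low.drop (low.length - 2)).any (hitsKw kwClose)
        if salutation && additional && closing then 5 else 0

-- ===== PRECONDITION & SPEC =====
-- Pre_ excludes only dicts without the key "sentences", where A raises KeyError.
def Pre_score_flow (text_data : List (String × List String)) : Prop :=
  "sentences" ∈ text_data.map Prod.fst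
instance (text_data : List (String × List String)) : Decidable (Pre_score_flow text_data) := by unfold Pre_score_flow; infer_instance
def pvWitness_score_flow : (List (String × List String)) :=
  [("sentences", ["hello everyone", "i am ravi from pune", "i like cricket", "thank you"])]

def Spec_score_flow (text_data : List (String × List String)) (out : Int) : Prop := out = score_flow_alt text_data
instance (text_data : List (String × List String)) (out : Int) : Decidable (Spec_score_flow text_data out) := by unfold Spec_score_flow; infer_instance

-- ===== CLAIM (what is proved, stated in full; the proofs are below) =====
def Claim_equal_score_flow : Prop := ∀ (text_data : List (String × List String)), Dom_score_flow text_data → Pre_score_flow text_data → Spec_score_flow text_data (score_flow text_data)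

-- ===== LEMMAS AND PROOFS =====

-- closed form of A's loop body, abstracted over the start index and incoming flags
theorem score_flow_loop_closed (n : Int) (l : List String) :
    ∀ (i0 : Int) (a b c d : Bool),
    (PySem.List.enumerate l i0).foldl
      (fun (fl : Bool × Bool × Bool × Bool) (p : Int × String) =>
        let sl := PySem.Str.lower p.2
        let f1 := fl.1 || (decide (p.1 < 2) && hitsKw kwSal sl)
        let f2 := fl.2.1 || hitsKw kwBasic sl
        let f3 := fl.2.2.1 || (f2 && hitsKw kwAdd sl)
        let f4 := fl.2.2.2 || (decide (n - 2 ≤ p.1) && hitsKw kwClose sl)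
        (f1, f2, f3, f4)) (a, b, c, d)
    = ( a || (l.take (2 - i0).toNat).any (fun s => hitsKw kwSal (PySem.Str.lower s))
      , b || l.any (fun s => hitsKw kwBasic (PySem.Str.lower s))
      , c || (if b then l.any (fun s => hitsKw kwAdd (PySem.Str.lower s))
              else match l.findIdx? (fun s => hitsKw kwBasic (PySem.Str.lower s)) with
                   | none => false
                   | some f => (l.drop f).any (fun s => hitsKw kwAdd (PySem.Str.lower s)))
      , d || (l.drop (n - 2 - i0).toNat).any (fun s => hitsKw kwClose (PySem.Str.lower s)) ) := by
  induction l with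
  | nil => intro i0 a b c d; simp [PySem.List.enumerate_nil]
  | cons x l ih =>
    intro i0 a b c d
    rw [PySem.List.enumerate_cons, List.foldl_cons, ih]
    refine Prod.ext ?_ (Prod.ext ?_ (Prod.ext ?_ ?_))
    · -- salutation component
      by_cases h : i0 < 2
      · have ht : (2 - i0).toNat = ((2 - (i0 + 1)).toNat) + 1 := by omega
        simp [ht, h, List.any_cons, Bool.or_assoc]
      · have h2 : (2 - i0).toNat = 0 := by omega
        have h3 : (2 - (i0 + 1)).toNat = 0 := by omega
        simp [h2, h3, h]
    · -- basic component
      simp [List.any_cons, Bool.or_assoc]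
    · -- additional component
      by_cases hb : b
      · simp [hb, List.any_cons]
        cases hx : hitsKw kwAdd (PySem.Str.lower x)
        · simp
        · simp [Bool.or_left_comm]
      · by_cases hbx : hitsKw kwBasic (PySem.Str.lower x)
        · simp [hb, hbx, List.findIdx?_cons, List.any_cons, Bool.or_assoc]
        · simp only [hb, hbx, Bool.or_false, Bool.false_and, List.findIdx?_cons]
          cases hf : l.findIdx? (fun s => hitsKw kwBasic (PySem.Str.lower s)) with
          | none => simp
          | some f => simp [List.drop_succ_cons]
    · -- closing component
      by_cases h : n - 2 ≤ i0
      · have h2 : (n - 2 - i0).toNat = 0 := by omega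
        have h3 : (n - 2 - (i0 + 1)).toNat = 0 := by omega
        simp [h2, h3, h, List.any_cons, Bool.or_assoc]
      · have ht : (n - 2 - i0).toNat = ((n - 2 - (i0 + 1)).toNat) + 1 := by omega
        simp [ht, h, List.drop_succ_cons]

theorem score_flow_eq_alt (text_data : List (String × List String)) :
    score_flow text_data = score_flow_alt text_data := by
  unfold score_flow score_flow_alt
  cases hget : (PySem.Dict.ofList text_data).get? "sentences" with
  | none => rfl
  | some sentences =>
    by_cases hlen : sentences.length < 2
    · simp [hlen]
    · simp only [hlen, if_false]
      rw [score_flow_loop_closed (sentences.length : Int) sentences 0 false false false false]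
      simp only [Bool.false_or]
      have h2 : ((2 : Int) - 0).toNat = 2 := by omega
      have hd : (((sentences.length : Int)) - 2 - 0).toNat = sentences.length - 2 := by omega
      rw [h2, hd]
      rw [List.findIdx?_map, List.length_map]
      cases hf : sentences.findIdx? (hitsKw kwBasic ∘ PySem.Str.lower) with
      | none =>
        have hb : sentences.any (fun s => hitsKw kwBasic (PySem.Str.lower s)) = false := by
          rw [List.any_eq_false]
          intro s hs
          have := List.findIdx?_eq_none_iff.mp hf s hs
          simpa using this
        have hf' : sentences.findIdx? (fun s => hitsKw kwBasic (PySem.Str.lower s)) = none := by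
          simpa [Function.comp] using hf
        simp [hb, hf']
      | some f =>
        have hf' : sentences.findIdx? (fun s => hitsKw kwBasic (PySem.Str.lower s)) = some f := by
          simpa [Function.comp] using hf
        have hb : sentences.any (fun s => hitsKw kwBasic (PySem.Str.lower s)) = true := by
          rw [List.any_eq_true]
          have hlt := List.findIdx?_eq_some_iff_findIdx_eq.mp hf' |>.1
          have hp : hitsKw kwBasic (PySem.Str.lower sentences[f]) = true := by
            have := List.findIdx?_eq_some_iff_getElem.mp hf'
            obtain ⟨h', hpf, _⟩ := this
            simpa using hpf
          exact ⟨sentences[f], List.getElem_mem _, hp⟩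
        have e1 : ((sentences.map PySem.Str.lower).take 2).any (hitsKw kwSal)
            = (sentences.take 2).any fun s => hitsKw kwSal (PySem.Str.lower s) := by
          simp [← List.map_take, Function.comp_def]
        have e2 : ((sentences.map PySem.Str.lower).drop f).any (hitsKw kwAdd)
            = (sentences.drop f).any fun s => hitsKw kwAdd (PySem.Str.lower s) := by
          simp [← List.map_drop, Function.comp_def]
        have e3 : ((sentences.map PySem.Str.lower).drop (sentences.length - 2)).any (hitsKw kwClose)
            = (sentences.drop (sentences.length - 2)).any fun s => hitsKw kwClose (PySem.Str.lower s) := by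
          simp [← List.map_drop, Function.comp_def]
        simp only [hf', hb, e1, e2, e3, Bool.and_true]
        rcases Bool.eq_false_or_eq_true ((sentences.take 2).any fun s => hitsKw kwSal (PySem.Str.lower s)) with hs | hs <;>
        rcases Bool.eq_false_or_eq_true (((sentences.drop (sentences.length - 2)).any fun s => hitsKw kwClose (PySem.Str.lower s))) with hc | hc <;>
          simp [hs, hc]

-- ===== VERDICT (by name: the statement is the Claim_ definition above) =====
theorem score_flow_spec : Claim_equal_score_flow := by
  intro text_data _ _
  unfold Spec_score_flow
  exact score_flow_eq_alt text_data
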